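-- pv_equiv track=rewrite | github.com/XOM91K/EGE | Danzan_Ege_2026/5/16.py | v4
-- ===== SOURCE A (Python) =====
-- def v4(d):
--     s = ''
--     while d > 0:
--         s += str(d%4)
--         d //= 4
--     if s == '':
--         return '0'
--     return s[::-1]
-- ===== SOURCE B (Python) =====
-- def v4(d):
--     if d <= 0:
--         return '0'
--     p = 1
--     while p * 4 <= d:
--         p *= 4
--     s = ''
--     while p >= 1:
--         s += str(d // p)
--         d %= p
--         p //= 4
--     return s
-- ===== Notes on version B (the rewrite author's own statement) =====
-- stated objective: alternative
-- what changed: B emits base-4 digits most-significant-first by maintaining a descending place value (largest power of 4 <= d), so the digits come out left-to-right with no final string reversal, instead of A's remainder collection followed by s[::-1].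
import Mathlib
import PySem

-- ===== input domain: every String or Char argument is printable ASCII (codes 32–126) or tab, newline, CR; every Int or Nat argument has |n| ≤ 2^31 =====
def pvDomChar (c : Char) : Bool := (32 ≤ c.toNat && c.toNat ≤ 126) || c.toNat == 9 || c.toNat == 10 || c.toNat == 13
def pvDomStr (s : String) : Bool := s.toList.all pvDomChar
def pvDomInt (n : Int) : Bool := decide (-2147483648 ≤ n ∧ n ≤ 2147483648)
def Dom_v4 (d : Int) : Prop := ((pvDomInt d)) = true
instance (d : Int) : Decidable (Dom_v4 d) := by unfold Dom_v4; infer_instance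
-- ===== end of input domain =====

-- B converts to base 4 most-significant-digit first, tracking a descending place value,
-- instead of A's least-significant-first remainder collection followed by s[::-1] (alternative decomposition, same cost).

-- ===== PORT A =====
-- while d > 0: s += str(d%4); d //= 4
def v4Loop (s : String) (d : Int) : String :=
  if h : d > 0 then
    v4Loop (s ++ PySem.Int.toStr (PySem.Int.mod d 4)) (PySem.Int.floordiv d 4)
  else s
termination_by d.toNat
decreasing_by
  rw [PySem.Int.floordiv_eq_ediv_of_pos (by norm_num)]
  omega

def v4 (d : Int) : String :=
  let s := v4Loop "" d
  if s = "" then "0"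
  else (PySem.Str.slice? s none none (-1)).getD s   -- s[::-1]; step ≠ 0, so always `some`

-- ===== PORT B =====
-- while p * 4 <= d: p *= 4   (fuel only makes the recursion total; d.toNat + 1 iterations always suffice)
def findP (fuel : Nat) (d p : Int) : Int :=
  match fuel with
  | 0 => p
  | fuel + 1 => if p * 4 ≤ d then findP fuel d (p * 4) else p

-- while p >= 1: s += str(d // p); d %= p; p //= 4
def msbLoop (s : String) (d p : Int) : String :=
  if h : 1 ≤ p then
    msbLoop (s ++ PySem.Int.toStr (PySem.Int.floordiv d p)) (PySem.Int.mod d p)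
      (PySem.Int.floordiv p 4)
  else s
termination_by p.toNat
decreasing_by
  rw [PySem.Int.floordiv_eq_ediv_of_pos (by norm_num)]
  omega

def v4_alt (d : Int) : String :=
  if d ≤ 0 then "0"
  else msbLoop "" d (findP (d.toNat + 1) d 1)

-- ===== PRECONDITION & SPEC =====
def Spec_v4 (d : Int) (out : String) : Prop := out = v4_alt d
instance (d : Int) (out : String) : Decidable (Spec_v4 d out) := by unfold Spec_v4; infer_instance

-- ===== CLAIM (what is proved, stated in full; the proofs are below) =====
def Claim_equal_v4 : Prop := ∀ (d : Int), Dom_v4 d → Spec_v4 d (v4 d)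

-- ===== LEMMAS AND PROOFS =====

-- digit character '0'..'3'
def digitC (k : Nat) : Char := Char.ofNat (48 + k)

-- A's digit stream, least-significant first (as digit values)
def lsbN (n : Nat) : List Nat :=
  if n = 0 then [] else n % 4 :: lsbN (n / 4)
termination_by n
decreasing_by exact Nat.div_lt_self (by omega) (by norm_num)

-- B's digit stream: the w base-4 digits of n, most-significant first
def msbW : Nat → Nat → List Nat
  | 0, _ => []
  | w + 1, n => n / 4 ^ w :: msbW w (n % 4 ^ w)

theorem toStr_digit (k : Nat) (hk : k < 4) :
    PySem.Int.toStr (k : Int) = String.ofList [digitC k] := by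
  interval_cases k <;> decide

theorem lsbN_pos (n : Nat) (h : 0 < n) : lsbN n = n % 4 :: lsbN (n / 4) := by
  rw [lsbN]; simp [Nat.pos_iff_ne_zero.mp h]

theorem len_lsbN_le (w : Nat) : ∀ n, n < 4 ^ w → (lsbN n).length ≤ w := by
  induction w with
  | zero => intro n hn; interval_cases n; simp [lsbN]
  | succ w ih =>
    intro n hn
    rcases Nat.eq_zero_or_pos n with h0 | h0
    · subst h0; simp [lsbN]
    · rw [lsbN_pos n h0]
      have := ih (n / 4) (by
        have : n < 4 * 4 ^ w := by rw [pow_succ] at hn; omega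
        omega)
      simpa using Nat.succ_le_succ this

theorem len_lsbN_ge (w : Nat) : ∀ n, 4 ^ w ≤ n → w + 1 ≤ (lsbN n).length := by
  induction w with
  | zero =>
    intro n hn
    rw [lsbN_pos n (by omega)]; simp
  | succ w ih =>
    intro n hn
    have h4 : 4 ^ (w + 1) = 4 * 4 ^ w := by ring
    have hp : 0 < 4 ^ w := Nat.pow_pos (by norm_num)
    rw [lsbN_pos n (by omega)]
    have := ih (n / 4) (by omega)
    simpa using Nat.succ_le_succ this

theorem lsbN_add_pow (w : Nat) :
    ∀ q r, 1 ≤ q → q < 4 → r < 4 ^ w →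
      lsbN (q * 4 ^ w + r) = lsbN r ++ List.replicate (w - (lsbN r).length) 0 ++ [q] := by
  induction w with
  | zero =>
    intro q r h1 h4 hr
    interval_cases r
    simp only [pow_zero, mul_one, Nat.add_zero]
    rw [lsbN_pos q (by omega)]
    have hm : q % 4 = q := Nat.mod_eq_of_lt h4
    have hd : q / 4 = 0 := Nat.div_eq_of_lt h4
    simp [lsbN, hm, hd]
  | succ w ih =>
    intro q r h1 h4 hr
    have h4w : 4 ^ (w + 1) = 4 * 4 ^ w := by ring
    set t := 4 ^ w with ht
    have htpos : 0 < t := Nat.pow_pos (by norm_num)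
    have hn : q * 4 ^ (w + 1) + r = 4 * (q * t) + r := by rw [h4w]; ring
    have hmod : (q * 4 ^ (w + 1) + r) % 4 = r % 4 := by omega
    have hdiv : (q * 4 ^ (w + 1) + r) / 4 = q * t + r / 4 := by omega
    have hpos : 0 < q * 4 ^ (w + 1) + r := by
      have h1t : 0 < 4 ^ (w + 1) := Nat.pow_pos (by norm_num)
      have := Nat.mul_pos h1 h1t
      omega
    rw [lsbN_pos _ hpos, hmod, hdiv]
    rw [ih q (r / 4) h1 h4 (by omega)]
    rcases Nat.eq_zero_or_pos r with h0 | h0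
    · subst h0
      simp [lsbN, List.replicate_succ]
    · rw [lsbN_pos r h0]
      simp [Nat.succ_sub_succ]

theorem msbW_eq (w : Nat) : ∀ n, n < 4 ^ w →
    msbW w n = List.replicate (w - (lsbN n).length) 0 ++ (lsbN n).reverse := by
  induction w with
  | zero => intro n hn; interval_cases n; simp [msbW, lsbN]
  | succ w ih =>
    intro n hn
    have hp : 0 < 4 ^ w := Nat.pow_pos (by norm_num)
    have h4w : 4 ^ (w + 1) = 4 * 4 ^ w := by ring
    rcases Nat.lt_or_ge n (4 ^ w) with hlt | hge
    · have hd : n / 4 ^ w = 0 := Nat.div_eq_of_lt hlt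
      have hm : n % 4 ^ w = n := Nat.mod_eq_of_lt hlt
      have hlen := len_lsbN_le w n hlt
      rw [msbW, hd, hm, ih n hlt]
      have : w + 1 - (lsbN n).length = (w - (lsbN n).length) + 1 := by omega
      rw [this, List.replicate_succ]
      simp
    · set q := n / 4 ^ w with hq
      set r := n % 4 ^ w with hr
      have hq1 : 1 ≤ q := (Nat.one_le_div_iff hp).mpr hge
      have hq4 : q < 4 := by
        have hn4 : n < 4 * 4 ^ w := by rw [h4w] at hn; omega
        exact (Nat.div_lt_iff_lt_mul hp).mpr hn4
      have hrlt : r < 4 ^ w := Nat.mod_lt _ hp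
      have hnqr : n = q * 4 ^ w + r := by
        rw [hq, hr, Nat.mul_comm]; exact (Nat.div_add_mod n (4 ^ w)).symm
      have hlsb := lsbN_add_pow w q r hq1 hq4 hrlt
      have hlenr := len_lsbN_le w r hrlt
      rw [msbW, ← hq, ← hr, ih r hrlt, hnqr, hlsb]
      have hz : w + 1 - (lsbN r ++ List.replicate (w - (lsbN r).length) 0 ++ [q]).length = 0 := by
        simp; omega
      rw [hz]
      simp [List.reverse_append]

-- the p-finding loop returns the largest power of 4 not exceeding d
theorem findP_spec (fuel : Nat) : ∀ (d : Int) (i : Nat),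
    (4 : Int) ^ i ≤ d → d < 4 ^ (i + fuel) →
    ∃ k, findP fuel d (4 ^ i) = 4 ^ k ∧ (4 : Int) ^ k ≤ d ∧ d < 4 ^ (k + 1) := by
  induction fuel with
  | zero => intro d i h1 h2; simp at h2; omega
  | succ fuel ih =>
    intro d i h1 h2
    rw [findP]
    by_cases hc : (4 : Int) ^ i * 4 ≤ d
    · rw [if_pos hc]
      have h41 : (4 : Int) ^ i * 4 = 4 ^ (i + 1) := by ring
      rw [h41]
      exact ih d (i + 1) (h41 ▸ hc) (by
        have : i + 1 + fuel = i + (fuel + 1) := by omega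
        rw [this]; exact h2)
    · rw [if_neg hc]
      refine ⟨i, rfl, h1, ?_⟩
      calc d < 4 ^ i * 4 := lt_of_not_ge hc
        _ = 4 ^ (i + 1) := by ring

-- A's loop appends the least-significant-first digit characters
theorem v4Loop_eq (n : Nat) : ∀ (d : Int) (s : String), d.toNat = n →
    (v4Loop s d).toList = s.toList ++ (lsbN n).map digitC := by
  induction n using Nat.strong_induction_on with
  | _ n ih =>
    intro d s hd
    rw [v4Loop]
    by_cases hpos : d > 0
    · rw [dif_pos hpos]
      have hdn : d = (n : Int) := by omega
      have hnpos : 0 < n := by omega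
      have hmod : PySem.Int.mod d 4 = ((n % 4 : Nat) : Int) := by
        rw [hdn]; exact_mod_cast PySem.Int.mod_natCast n 4
      have hdiv : PySem.Int.floordiv d 4 = ((n / 4 : Nat) : Int) := by
        rw [hdn]; exact_mod_cast PySem.Int.floordiv_natCast n 4
      rw [hmod, hdiv, ih (n / 4) (Nat.div_lt_self hnpos (by norm_num)) _ _ (by omega),
        toStr_digit (n % 4) (Nat.mod_lt _ (by norm_num))]
      rw [lsbN_pos n hnpos]
      simp
    · rw [dif_neg hpos]
      have : n = 0 := by omega
      simp [this, lsbN]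

theorem pow_castN (k : Nat) : ((4 : Int) ^ k) = ((4 ^ k : Nat) : Int) := by
  push_cast; ring

-- B's digit loop appends the most-significant-first digit characters
theorem msbLoop_eq (w : Nat) : ∀ (n : Int) (s : String), 0 ≤ n → n < 4 ^ (w + 1) →
    (msbLoop s n ((4 : Int) ^ w)).toList = s.toList ++ (msbW (w + 1) n.toNat).map digitC := by
  induction w with
  | zero =>
    intro n s h0 h4
    rw [msbLoop, dif_pos (by norm_num)]
    rw [msbLoop, dif_neg (by decide)]
    have hdig : PySem.Int.floordiv n ((4 : Int) ^ 0) = ((n.toNat : Nat) : Int) := by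
      rw [pow_zero, PySem.Int.floordiv_eq_ediv_of_pos (by norm_num), Int.ediv_one]
      omega
    have h4' : n.toNat < 4 := by
      have : n < 4 := by rw [pow_one] at h4; exact h4
      omega
    rw [hdig, toStr_digit n.toNat h4']
    simp [msbW]
  | succ w ih =>
    intro n s h0 h4
    have hppos : (0 : Int) < 4 ^ (w + 1) := by positivity
    have hNpos : 0 < 4 ^ (w + 1) := Nat.pow_pos (show 0 < 4 by norm_num)
    rw [msbLoop, dif_pos (by omega)]
    have hdivp : PySem.Int.floordiv ((4 : Int) ^ (w + 1)) 4 = (4 : Int) ^ w := by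
      rw [PySem.Int.floordiv_eq_ediv_of_pos (by norm_num), pow_succ]
      exact Int.mul_ediv_cancel _ (by norm_num)
    have hcast : n = ((n.toNat : Nat) : Int) := by omega
    have hdig4 : PySem.Int.floordiv n ((4 : Int) ^ (w + 1)) = ((n.toNat / 4 ^ (w + 1) : Nat) : Int) := by
      rw [hcast, pow_castN]
      exact PySem.Int.floordiv_natCast _ _
    have hmod4 : PySem.Int.mod n ((4 : Int) ^ (w + 1)) = ((n.toNat % 4 ^ (w + 1) : Nat) : Int) := by
      rw [hcast, pow_castN]
      exact PySem.Int.mod_natCast _ _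
    have hdiglt : n.toNat / 4 ^ (w + 1) < 4 := by
      have hlt : n.toNat < 4 * 4 ^ (w + 1) := by
        have h44 : ((4 : Int) ^ (w + 1 + 1)) = ((4 * 4 ^ (w + 1) : Nat) : Int) := by
          push_cast; ring
        rw [h44] at h4
        omega
      exact (Nat.div_lt_iff_lt_mul hNpos).mpr hlt
    have hmlt : ((n.toNat % 4 ^ (w + 1) : Nat) : Int) < 4 ^ (w + 1) := by
      rw [pow_castN]
      exact_mod_cast Nat.mod_lt _ hNpos
    rw [hdivp, hmod4, ih _ _ (by positivity) hmlt, hdig4, toStr_digit _ hdiglt,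
      Int.toNat_natCast]
    rw [show msbW (w + 1 + 1) n.toNat
        = n.toNat / 4 ^ (w + 1) :: msbW (w + 1) (n.toNat % 4 ^ (w + 1)) from rfl]
    simp

-- ===== VERDICT (by name: the statement is the Claim_ definition above) =====
theorem v4_spec : Claim_equal_v4 := by
  intro d _
  unfold Spec_v4
  by_cases hpos : 0 < d
  · -- find the exponent k with 4^k ≤ d < 4^(k+1)
    have hfuel : d < 4 ^ (0 + (d.toNat + 1)) := by
      have h1 : d.toNat < 4 ^ (d.toNat + 1) :=
        Nat.lt_of_lt_of_le (Nat.lt_pow_self (by norm_num))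
          (Nat.pow_le_pow_right (by norm_num) (by omega))
      calc d = ((d.toNat : Nat) : Int) := by omega
        _ < ((4 ^ (d.toNat + 1) : Nat) : Int) := by exact_mod_cast h1
        _ = 4 ^ (0 + (d.toNat + 1)) := by push_cast; ring_nf
    obtain ⟨k, hk, hkle, hklt⟩ := findP_spec (d.toNat + 1) d 0 (by rw [pow_zero]; omega) hfuel
    set n := d.toNat with hn
    have hkleN : 4 ^ k ≤ n := by have := pow_castN k; omega
    have hkltN : n < 4 ^ (k + 1) := by have := pow_castN (k + 1); omega
    have hA := v4Loop_eq n d "" rfl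
    have hB := msbLoop_eq k d "" hpos.le hklt
    have hlen : (lsbN n).length = k + 1 :=
      le_antisymm (len_lsbN_le (k + 1) n hkltN) (len_lsbN_ge k n hkleN)
    have hmsb : msbW (k + 1) n = (lsbN n).reverse := by
      rw [msbW_eq (k + 1) n hkltN, hlen]; simp
    have hne : lsbN n ≠ [] := by
      intro h; rw [h] at hlen; simp at hlen
    have hsne : v4Loop "" d ≠ "" := by
      intro h
      rw [h] at hA
      simp at hA
      exact hne hA
    have hvA : v4 d = (PySem.Str.slice? (v4Loop "" d) none none (-1)).getD (v4Loop "" d) := by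
      simp only [v4]
      rw [if_neg hsne]
    have hvB : v4_alt d = msbLoop "" d ((4 : Int) ^ k) := by
      simp only [v4_alt]
      rw [if_neg (by omega), show (1 : Int) = (4 : Int) ^ 0 by norm_num, hk]
    rw [hvA, hvB, PySem.Str.slice?_none_none_neg_one, Option.getD_some]
    apply String.toList_inj.mp
    rw [hB, hmsb]
    simp [hA, List.map_reverse]
  · have hloop : v4Loop "" d = "" := by
      rw [v4Loop, dif_neg hpos]
    simp [v4, v4_alt, hloop, show d ≤ 0 by omega]
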